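-- pv_equiv track=rewrite | github.com/isabella-coder/slim | admin-console/server.py | summarize_followups
-- ===== SOURCE A (Python) =====
-- def summarize_followups(items):
--     source = items if isinstance(items, list) else []
--     return {
--         "total": len(source),
--         "dueToday": len([item for item in source if item.get("status") == "DUE_TODAY"]),
--         "overdue": len([item for item in source if item.get("status") == "OVERDUE"]),
--         "pending": len([item for item in source if item.get("status") == "PENDING"]),
--         "done": len([item for item in source if item.get("status") == "DONE"]),
--     }
-- ===== SOURCE B (Python) =====
-- def summarize_followups(items):
--     source = items if isinstance(items, list) else []
--     due_today = overdue = pending = done = 0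
--     for item in source:
--         s = item.get("status")
--         if s == "DUE_TODAY":
--             due_today += 1
--         elif s == "OVERDUE":
--             overdue += 1
--         elif s == "PENDING":
--             pending += 1
--         elif s == "DONE":
--             done += 1
--     return {
--         "total": len(source),
--         "dueToday": due_today,
--         "overdue": overdue,
--         "pending": pending,
--         "done": done,
--     }
-- ===== Notes on version B (the rewrite author's own statement) =====
-- stated objective: simpler
-- what changed: Replaces A's four separate filtering passes (one list comprehension per status) by a single loop over the items that increments one of four counters per item.
import Mathlib
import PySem

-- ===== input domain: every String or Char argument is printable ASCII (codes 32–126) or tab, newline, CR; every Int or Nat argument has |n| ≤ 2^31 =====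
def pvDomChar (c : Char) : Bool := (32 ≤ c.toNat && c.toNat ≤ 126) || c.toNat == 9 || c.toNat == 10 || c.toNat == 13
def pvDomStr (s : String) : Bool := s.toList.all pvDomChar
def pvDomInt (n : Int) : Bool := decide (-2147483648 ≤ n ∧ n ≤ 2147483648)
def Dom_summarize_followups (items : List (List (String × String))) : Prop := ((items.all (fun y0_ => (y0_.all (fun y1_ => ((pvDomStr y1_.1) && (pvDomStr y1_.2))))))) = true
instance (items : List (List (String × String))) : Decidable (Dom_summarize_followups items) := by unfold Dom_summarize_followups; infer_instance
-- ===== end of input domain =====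

-- B replaces A's four separate filtering passes by one loop over the items with four counters (objective: simpler).

-- item.get("status"): first-match lookup in the association list (exact for a Python dict)
def pvGetStatus (item : List (String × String)) : Option String :=
  (PySem.Dict.mk item).get? "status"

-- ===== PORT A =====
def summarize_followups (items : List (List (String × String))) : List (String × Int) :=
  [("total", (items.length : Int)),
   ("dueToday", ((items.filter (fun item => pvGetStatus item == some "DUE_TODAY")).length : Int)),
   ("overdue", ((items.filter (fun item => pvGetStatus item == some "OVERDUE")).length : Int)),
   ("pending", ((items.filter (fun item => pvGetStatus item == some "PENDING")).length : Int)),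
   ("done", ((items.filter (fun item => pvGetStatus item == some "DONE")).length : Int))]

-- ===== PORT B =====
def summarize_followups_alt (items : List (List (String × String))) : List (String × Int) :=
  let c := items.foldl (fun (c : Int × Int × Int × Int) item =>
    let s := pvGetStatus item
    if s == some "DUE_TODAY" then (c.1 + 1, c.2.1, c.2.2.1, c.2.2.2)
    else if s == some "OVERDUE" then (c.1, c.2.1 + 1, c.2.2.1, c.2.2.2)
    else if s == some "PENDING" then (c.1, c.2.1, c.2.2.1 + 1, c.2.2.2)
    else if s == some "DONE" then (c.1, c.2.1, c.2.2.1, c.2.2.2 + 1)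
    else c) (0, 0, 0, 0)
  [("total", (items.length : Int)),
   ("dueToday", c.1), ("overdue", c.2.1), ("pending", c.2.2.1), ("done", c.2.2.2)]

-- ===== PRECONDITION & SPEC =====
def Spec_summarize_followups (items : List (List (String × String))) (out : List (String × Int)) : Prop := out = summarize_followups_alt items
instance (items : List (List (String × String))) (out : List (String × Int)) : Decidable (Spec_summarize_followups items out) := by unfold Spec_summarize_followups; infer_instance

-- ===== CLAIM (what is proved, stated in full; the proofs are below) =====
def Claim_equal_summarize_followups : Prop := ∀ (items : List (List (String × String))), Dom_summarize_followups items → Spec_summarize_followups items (summarize_followups items)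

-- ===== LEMMAS AND PROOFS =====

-- loop invariant: the fold adds the four filter-counts to the starting accumulator
theorem pv_fold_counts (items : List (List (String × String))) (a b c d : Int) :
    items.foldl (fun (c : Int × Int × Int × Int) item =>
      let s := pvGetStatus item
      if s == some "DUE_TODAY" then (c.1 + 1, c.2.1, c.2.2.1, c.2.2.2)
      else if s == some "OVERDUE" then (c.1, c.2.1 + 1, c.2.2.1, c.2.2.2)
      else if s == some "PENDING" then (c.1, c.2.1, c.2.2.1 + 1, c.2.2.2)
      else if s == some "DONE" then (c.1, c.2.1, c.2.2.1, c.2.2.2 + 1)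
      else c) (a, b, c, d)
    = (a + (items.filter (fun item => pvGetStatus item == some "DUE_TODAY")).length,
       b + (items.filter (fun item => pvGetStatus item == some "OVERDUE")).length,
       c + (items.filter (fun item => pvGetStatus item == some "PENDING")).length,
       d + (items.filter (fun item => pvGetStatus item == some "DONE")).length) := by
  induction items generalizing a b c d with
  | nil => simp
  | cons hd tl ih =>
    simp only [List.foldl_cons, List.filter_cons]
    by_cases h1 : pvGetStatus hd == some "DUE_TODAY"
    · have h2 : ¬ (pvGetStatus hd == some "OVERDUE") = true := by
        simp at h1; simp [h1]
      have h3 : ¬ (pvGetStatus hd == some "PENDING") = true := by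
        simp at h1; simp [h1]
      have h4 : ¬ (pvGetStatus hd == some "DONE") = true := by
        simp at h1; simp [h1]
      simp only [h1, h2, h3, h4, if_pos, ih]
      simp; omega
    · by_cases h2 : pvGetStatus hd == some "OVERDUE"
      · have h3 : ¬ (pvGetStatus hd == some "PENDING") = true := by
          simp at h2; simp [h2]
        have h4 : ¬ (pvGetStatus hd == some "DONE") = true := by
          simp at h2; simp [h2]
        simp only [h1, h2, h3, h4, if_pos, ih]
        simp; omega
      · by_cases h3 : pvGetStatus hd == some "PENDING"
        · have h4 : ¬ (pvGetStatus hd == some "DONE") = true := by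
            simp at h3; simp [h3]
          simp only [h1, h2, h3, h4, if_pos, ih]
          simp; omega
        · by_cases h4 : pvGetStatus hd == some "DONE"
          · simp only [h1, h2, h3, h4, if_pos, ih]
            simp; omega
          · simp only [h1, h2, h3, h4, ih]
            simp

-- ===== VERDICT (by name: the statement is the Claim_ definition above) =====
theorem summarize_followups_spec : Claim_equal_summarize_followups := by
  intro items _
  show _ = _
  simp only [summarize_followups, summarize_followups_alt, pv_fold_counts]
  norm_num
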